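-- pv_equiv track=rewrite | github.com/tinarazic/UVP | Utrjevanje 3/ogrlice.py | ogrlice
-- ===== SOURCE A (Python) =====
-- def ogrlice(b,r):
--     if b==0 :
--         yield 'R' * r
--     elif r == 0:
--         yield 'B' * b
--     else:
--         for x in ogrlice(b-1,r):
--             yield 'B' + x
--
--         for y in ogrlice(b,r-1):
--             yield 'R' + y
-- ===== SOURCE B (Python) =====
-- from itertools import combinations
--
-- def ogrlice(b, r):
--     n = b + r
--     for positions in combinations(range(n), b):
--         chars = ['R'] * n
--         for i in positions:
--             chars[i] = 'B'
--         yield ''.join(chars)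
-- ===== Notes on version B (the rewrite author's own statement) =====
-- stated objective: idiomatic
-- what changed: A's two-branch recursive generator is replaced by a single loop over itertools.combinations(range(b+r), b) choosing the positions of the B's, building each string once with join; same lexicographic emission order.
-- outside the precondition, e.g. on ogrlice(-1, 0): A returns [''], B raises ValueError; on ogrlice(2, -1): A does not finish within the time limit, B returns []
import Mathlib
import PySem

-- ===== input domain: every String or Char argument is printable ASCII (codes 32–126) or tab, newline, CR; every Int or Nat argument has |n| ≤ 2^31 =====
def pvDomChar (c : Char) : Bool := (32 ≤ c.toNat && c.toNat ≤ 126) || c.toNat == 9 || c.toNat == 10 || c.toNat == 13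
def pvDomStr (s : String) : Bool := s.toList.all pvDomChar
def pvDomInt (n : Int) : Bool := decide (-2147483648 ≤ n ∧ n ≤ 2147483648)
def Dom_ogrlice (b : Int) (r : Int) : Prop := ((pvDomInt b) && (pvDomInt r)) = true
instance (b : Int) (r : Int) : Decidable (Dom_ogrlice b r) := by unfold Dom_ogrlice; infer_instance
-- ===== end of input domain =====

-- B replaces A's two-way recursion by a single loop over itertools.combinations
-- choosing the positions of the 'B's (idiomatic; same lexicographic output order).

-- ===== PORT A =====
-- A's generator, on non-negative counts, as structural recursion producing the
-- yielded strings (as char lists) in order; strings are materialised at the end.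
def ogrliceNat : Nat → Nat → List (List Char)
  | 0, r => [List.replicate r 'R']
  | b+1, 0 => [List.replicate (b+1) 'B']
  | b+1, r+1 =>
      ((ogrliceNat b (r+1)).map (fun x => 'B' :: x)) ++
      ((ogrliceNat (b+1) r).map (fun y => 'R' :: y))

def ogrlice (b : Int) (r : Int) : List String :=
  (ogrliceNat b.toNat r.toNat).map String.mk

-- ===== PORT B =====
-- itertools.combinations(l, k) in its lexicographic emission order
-- (including its immediate 'r > n: empty iterator' short-circuit)
def combos : List Nat → Nat → List (List Nat)
  | _, 0 => [[]]
  | [], _+1 => []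
  | x::xs, k+1 =>
      if xs.length < k then []
      else ((combos xs k).map (fun c => x :: c)) ++ combos xs (k+1)

-- chars = ['R']*n; for i in positions: chars[i] = 'B'
def buildChars (n : Nat) (pos : List Nat) : List Char :=
  pos.foldl (fun l i => l.set i 'B') (List.replicate n 'R')

def ogrlice_alt (b : Int) (r : Int) : List String :=
  (combos (List.range (b + r).toNat) b.toNat).map
    (fun pos => String.mk (buildChars (b + r).toNat pos))

-- ===== PRECONDITION & SPEC =====
-- Pre_ excludes negative b or r: there Python A either recurses forever
-- (RecursionError, whenever the other count is nonzero) or, on the degenerate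
-- lines b<0∧r=0 and b=0∧r<0, returns [''] by the accident that 'X'*n is '' for
-- negative n, while B's combinations naturally raises or already agrees.
def Pre_ogrlice (b : Int) (r : Int) : Prop := 0 ≤ b ∧ 0 ≤ r
instance (b : Int) (r : Int) : Decidable (Pre_ogrlice b r) := by unfold Pre_ogrlice; infer_instance
def pvWitness_ogrlice : Int × Int := (2, 2)

def Spec_ogrlice (b : Int) (r : Int) (out : List String) : Prop := out = ogrlice_alt b r
instance (b : Int) (r : Int) (out : List String) : Decidable (Spec_ogrlice b r out) := by unfold Spec_ogrlice; infer_instance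

-- ===== CLAIM (what is proved, stated in full; the proofs are below) =====
def Claim_equal_ogrlice : Prop := ∀ (b : Int) (r : Int), Dom_ogrlice b r → Pre_ogrlice b r → Spec_ogrlice b r (ogrlice b r)

-- ===== LEMMAS AND PROOFS =====

-- membership picture of the chars a combination builds
def charBuild (n : Nat) (pos : List Nat) : List Char :=
  (List.range n).map (fun i => if i ∈ pos then 'B' else 'R')

theorem length_foldl_set (pos : List Nat) (L : List Char) :
    (pos.foldl (fun l i => l.set i 'B') L).length = L.length := by
  induction pos generalizing L with
  | nil => rfl
  | cons i pos ih => simp [List.foldl, ih]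

theorem getElem_foldl_set (pos : List Nat) (L : List Char) (j : Nat)
    (h : j < (pos.foldl (fun l i => l.set i 'B') L).length) (h' : j < L.length) :
    (pos.foldl (fun l i => l.set i 'B') L)[j] = if j ∈ pos then 'B' else L[j] := by
  induction pos generalizing L with
  | nil => simp
  | cons i pos ih =>
      have h2 : j < (L.set i 'B').length := by simpa using h'
      have := ih (L.set i 'B') (by simpa [length_foldl_set] using h2) h2
      simp only [List.foldl_cons] at *
      rw [this]
      by_cases hm : j ∈ pos
      · simp [hm]
      · by_cases hij : i = j
        · simp [hm, hij]
        · have hji : ¬ j = i := fun h => hij h.symm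
          simp [hm, hij, hji]

theorem buildChars_eq_charBuild (n : Nat) (pos : List Nat) :
    buildChars n pos = charBuild n pos := by
  apply List.ext_getElem
  · simp [buildChars, charBuild, length_foldl_set]
  · intro j h1 h2
    have hj : j < n := by simpa [buildChars, length_foldl_set] using h1
    have h1' : j < (List.foldl (fun l i => l.set i 'B') (List.replicate n 'R') pos).length := by
      simpa [buildChars] using h1
    have h' : j < (List.replicate n 'R').length := by simpa using hj
    have key := getElem_foldl_set pos (List.replicate n 'R') j h1' h'
    simp only [buildChars]
    rw [key]
    simp [charBuild]

theorem combos_of_gt (l : List Nat) (k : Nat) (h : l.length < k) : combos l k = [] := by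
  cases l with
  | nil => cases k with
    | zero => omega
    | succ k => rfl
  | cons x xs =>
      cases k with
      | zero => omega
      | succ k => simp at h; simp [combos, h]

-- the short-circuit is semantically transparent
theorem combos_cons (x : Nat) (xs : List Nat) (k : Nat) :
    combos (x::xs) (k+1) = ((combos xs k).map (fun c => x :: c)) ++ combos xs (k+1) := by
  by_cases h : xs.length < k
  · simp [combos, h, combos_of_gt xs k h, combos_of_gt xs (k+1) (by omega)]
  · simp [combos, h]

theorem combos_map (l : List Nat) (k : Nat) (f : Nat → Nat) :
    combos (l.map f) k = (combos l k).map (List.map f) := by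
  induction l generalizing k with
  | nil => cases k <;> simp [combos]
  | cons x xs ih =>
      cases k with
      | zero => simp [combos]
      | succ k => simp only [List.map_cons, combos_cons, ih, List.map_append, List.map_map, Function.comp_def, List.length_map]

theorem combos_self (l : List Nat) : combos l l.length = [l] := by
  induction l with
  | nil => rfl
  | cons x xs ih =>
      simp only [List.length_cons]
      rw [combos_cons, ih, combos_of_gt xs (xs.length + 1) (by omega)]
      simp

theorem charBuild_nil (n : Nat) : charBuild n [] = List.replicate n 'R' := by
  simp [charBuild, List.map_const']

theorem charBuild_range (n : Nat) : charBuild n (List.range n) = List.replicate n 'B' := by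
  unfold charBuild
  rw [List.map_congr_left (g := fun _ => 'B') (by intro i hi; simp [List.mem_range.mp hi])]
  simp [List.map_const']

theorem charBuild_succ_mapsucc (n : Nat) (pos : List Nat) :
    charBuild (n+1) (pos.map (· + 1)) = 'R' :: charBuild n pos := by
  unfold charBuild
  rw [List.range_succ_eq_map]
  simp only [List.map_cons, List.map_map]
  congr 1
  · simp
  · apply List.map_congr_left
    intro i _
    simp [Nat.succ_eq_add_one]

theorem charBuild_succ_zero_mapsucc (n : Nat) (pos : List Nat) :
    charBuild (n+1) (0 :: pos.map (· + 1)) = 'B' :: charBuild n pos := by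
  unfold charBuild
  rw [List.range_succ_eq_map]
  simp only [List.map_cons, List.map_map]
  congr 1
  · apply List.map_congr_left
    intro i _
    simp [Nat.succ_eq_add_one]

theorem main_eq (b r : Nat) :
    ogrliceNat b r = (combos (List.range (b + r)) b).map (charBuild (b + r)) := by
  induction b, r using ogrliceNat.induct with
  | case1 r => simp [ogrliceNat, combos, charBuild_nil]
  | case2 b =>
      have : combos (List.range (b + 1)) (b + 1) = [List.range (b+1)] := by
        have := combos_self (List.range (b+1))
        simpa using this
      simp [ogrliceNat, this, charBuild_range]
  | case3 b r ih1 ih2 =>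
      have hn : b + 1 + (r + 1) = (b + (r+1)) + 1 := by omega
      rw [hn, List.range_succ_eq_map]
      simp only [combos_cons, combos_map, List.map_append, List.map_map]
      rw [ogrliceNat]
      congr 1
      · rw [ih1]
        simp only [List.map_map]
        apply List.map_congr_left
        intro c _
        simp only [Function.comp_apply]
        rw [charBuild_succ_zero_mapsucc]
      · rw [ih2]
        have : b + 1 + r = b + (r + 1) := by omega
        rw [this]
        simp only [List.map_map]
        apply List.map_congr_left
        intro c _
        simp only [Function.comp_apply]
        rw [charBuild_succ_mapsucc]

-- ===== VERDICT (by name: the statement is the Claim_ definition above) =====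
theorem ogrlice_spec : Claim_equal_ogrlice := by
  intro b r _ hpre
  obtain ⟨hb, hr⟩ := hpre
  unfold Spec_ogrlice ogrlice ogrlice_alt
  have hn : (b + r).toNat = b.toNat + r.toNat := by omega
  rw [hn, main_eq]
  simp [buildChars_eq_charBuild]
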